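-- pv_equiv track=rewrite | github.com/marrink-lab/vermouth-martinize | vermouth/tests/test_do_mapping.py | _map_weights
-- ===== SOURCE A (Python) =====
-- from collections import defaultdict
--
-- def _map_weights(mapping):
--     """
--     Get the weights associated with a mapping
--     """
--     inv_map = defaultdict(list)
--     for from_, tos in mapping.items():
--         for to in tos:
--             inv_map[to].append(from_)
--     weights = {}
--     for bd, atoms in inv_map.items():
--         weights[bd] = {atom: 1 for atom in atoms}
--     return weights
-- ===== SOURCE B (Python) =====
-- def _map_weights(mapping):
--     """
--     Get the weights associated with a mapping
--     """
--     # one target-major pass: find bead order, then scan mapping per bead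
--     order = []
--     seen = set()
--     for tos in mapping.values():
--         for to in tos:
--             if to not in seen:
--                 seen.add(to)
--                 order.append(to)
--     return {to: {from_: 1 for from_, tos in mapping.items() if to in tos}
--             for to in order}
-- ===== Notes on version B (the rewrite author's own statement) =====
-- stated objective: alternative
-- what changed: Replaces the inverted defaultdict-of-lists intermediate with a target-major construction: compute the bead order once, then build each bead's weight dict by a direct membership scan of the mapping.
import Mathlib
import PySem

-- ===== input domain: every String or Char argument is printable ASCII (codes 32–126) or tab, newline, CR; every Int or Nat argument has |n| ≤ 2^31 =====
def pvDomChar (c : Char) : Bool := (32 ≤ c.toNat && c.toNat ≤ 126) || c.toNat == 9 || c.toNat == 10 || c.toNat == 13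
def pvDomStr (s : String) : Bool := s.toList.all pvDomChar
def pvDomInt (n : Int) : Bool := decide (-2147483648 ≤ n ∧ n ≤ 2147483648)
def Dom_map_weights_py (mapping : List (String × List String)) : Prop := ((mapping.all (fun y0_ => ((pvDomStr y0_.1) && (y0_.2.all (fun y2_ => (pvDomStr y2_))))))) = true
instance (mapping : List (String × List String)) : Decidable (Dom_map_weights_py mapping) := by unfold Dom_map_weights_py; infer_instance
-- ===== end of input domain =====

-- B replaces A's inverted defaultdict-of-lists intermediate by a target-major construction
-- (bead order first, then one membership scan of the mapping per bead); alternative, not faster.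

-- ===== PORT A =====
def map_weights_py (mapping : List (String × List String)) : List (String × List (String × Int)) :=
  -- inv_map = defaultdict(list); for from_, tos in mapping.items(): for tg in tos: inv_map[tg].append(from_)
  let inv_map : PySem.Dict String (List String) :=
    mapping.foldl (fun d p => p.2.foldl (fun d tg => d.modify tg [] (· ++ [p.1])) d) PySem.Dict.empty
  -- weights = {}; for bd, atoms in inv_map.items(): weights[bd] = {atom: 1 for atom in atoms}
  let weights : PySem.Dict String (PySem.Dict String Int) :=
    inv_map.items.foldl
      (fun w q => w.insert q.1 (q.2.foldl (fun m a => m.insert a (1 : Int)) PySem.Dict.empty))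
      PySem.Dict.empty
  weights.items.map (fun p => (p.1, p.2.items))

-- ===== PORT B =====
def map_weights_py_alt (mapping : List (String × List String)) : List (String × List (String × Int)) :=
  -- order/seen loop: distinct targets in first-occurrence order
  let order : PySem.Set String :=
    mapping.foldl (fun s p => p.2.foldl (fun s tg => PySem.Set.add s tg) s) PySem.Set.empty
  -- {tg: {from_: 1 for from_, tos in mapping.items() if tg in tos} for tg in order}
  order.map (fun tg =>
    (tg, (mapping.foldl (fun m p => if tg ∈ p.2 then m.insert p.1 (1 : Int) else m)
            (PySem.Dict.empty : PySem.Dict String Int)).items))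

-- ===== PRECONDITION & SPEC =====
def Spec_map_weights_py (mapping : List (String × List String)) (out : List (String × List (String × Int))) : Prop := out = map_weights_py_alt mapping
instance (mapping : List (String × List String)) (out : List (String × List (String × Int))) : Decidable (Spec_map_weights_py mapping out) := by unfold Spec_map_weights_py; infer_instance

-- ===== CLAIM (what is proved, stated in full; the proofs are below) =====
def Claim_equal_map_weights_py : Prop := ∀ (mapping : List (String × List String)), Dom_map_weights_py mapping → Spec_map_weights_py mapping (map_weights_py mapping)

-- ===== LEMMAS AND PROOFS =====

-- flatten a nested foldl into a foldl over the flatMap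
theorem pv_foldl_flatMap {α β σ : Type} (g : α → List β) (f : σ → β → σ)
    (l : List α) (init : σ) :
    l.foldl (fun s x => (g x).foldl f s) init = (l.flatMap g).foldl f init := by
  induction l generalizing init with
  | nil => rfl
  | cons a t ih => simp [List.flatMap_cons, List.foldl_append, ih]

-- the flat (tg, from) pair list of A's double loop
def pvPairs (mapping : List (String × List String)) : List (String × String) :=
  mapping.flatMap (fun p => p.2.map (fun tg => (tg, p.1)))

theorem pv_inv_eq (mapping : List (String × List String)) :
    mapping.foldl (fun d p => p.2.foldl (fun d tg => d.modify tg [] (· ++ [p.1])) d)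
      (PySem.Dict.empty : PySem.Dict String (List String))
      = (pvPairs mapping).foldl (fun d q => d.modify q.1 [] (· ++ [q.2])) PySem.Dict.empty := by
  unfold pvPairs
  rw [← pv_foldl_flatMap]
  apply PySem.List.foldl_congr_mem
  intro d p _
  simp [List.foldl_map]

theorem pv_rep_insert (l : List String) (a : String) (acc : PySem.Dict String Int) :
    (l.map (fun _ => a)).foldl (fun m x => m.insert x (1 : Int)) acc
      = if l.isEmpty then acc else acc.insert a 1 := by
  induction l generalizing acc with
  | nil => rfl
  | cons b t ih =>
      simp only [List.map_cons, List.foldl_cons, ih, List.isEmpty_cons]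
      cases t with
      | nil => simp
      | cons c u => simp [PySem.Dict.insert_insert_self]

-- per-key value agreement: A's {atom: 1 for atom in inv_map[c]} equals B's membership scan
theorem pv_value_eq (mapping : List (String × List String)) (c : String) :
    (((pvPairs mapping).filter (fun q => q.1 == c)).map (·.2)).foldl
        (fun m a => m.insert a (1 : Int)) PySem.Dict.empty
      = mapping.foldl (fun m p => if c ∈ p.2 then m.insert p.1 (1 : Int) else m)
          PySem.Dict.empty := by
  unfold pvPairs
  rw [List.filter_flatMap, List.map_flatMap, ← pv_foldl_flatMap]
  apply PySem.List.foldl_congr_mem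
  intro m p _
  rw [List.filter_map, List.map_map]
  simp only [Function.comp_def]
  rw [pv_rep_insert]
  by_cases h : c ∈ p.2
  · have : (p.2.filter (fun a => a == c)).isEmpty = false := by
      simp [List.isEmpty_eq_false_iff, List.filter_eq_nil_iff]
      exact h
    simp [this, h]
  · have : (p.2.filter (fun a => a == c)) = [] := by
      simp [List.filter_eq_nil_iff]
      intro a ha hac; exact absurd (hac ▸ ha) h
    simp [this, h]

-- A's key order = B's order set
theorem pv_keys_eq (mapping : List (String × List String)) :
    ((pvPairs mapping).foldl (fun d q => d.modify q.1 [] (· ++ [q.2]))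
        (PySem.Dict.empty : PySem.Dict String (List String))).keys
      = mapping.foldl (fun s p => p.2.foldl (fun s tg => PySem.Set.add s tg) s)
          PySem.Set.empty := by
  rw [PySem.Dict.keys_foldl_modify_key (key := Prod.fst)]
  have h2 : ∀ (l : List String) (s : PySem.Set String),
      l.foldl (fun s tg => PySem.Set.add s tg) s = PySem.Set.update s l := by
    intro l; induction l with
    | nil => intro s; rfl
    | cons a t ih => intro s; simp [PySem.Set.update_cons, ih]
  have h3 : mapping.foldl (fun s p => p.2.foldl (fun s tg => PySem.Set.add s tg) s)
      PySem.Set.empty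
      = mapping.foldl (fun s p => PySem.Set.update s p.2) PySem.Set.empty := by
    apply PySem.List.foldl_congr_mem; intro s p _; exact h2 p.2 s
  rw [h3]
  have h4 : ∀ (l : List (String × List String)) (s : PySem.Set String),
      l.foldl (fun s p => PySem.Set.update s p.2) s
        = PySem.Set.update s (l.flatMap (fun p => p.2)) := by
    intro l; induction l with
    | nil => intro s; simp [PySem.Set.update_nil]
    | cons a t ih => intro s; simp [List.flatMap_cons, PySem.Set.update_append, ih]
  rw [h4]
  have h5 : (pvPairs mapping).map Prod.fst = mapping.flatMap (fun p => p.2) := by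
    unfold pvPairs
    rw [List.map_flatMap]
    congr 1; funext p; rw [List.map_map]; simp [Function.comp_def]
  rw [h5]
  rfl

-- ===== VERDICT (by name: the statement is the Claim_ definition above) =====
theorem map_weights_py_spec : Claim_equal_map_weights_py := by
  intro mapping _
  unfold Spec_map_weights_py
  simp only [map_weights_py, map_weights_py_alt]
  rw [pv_inv_eq]
  set invD := (pvPairs mapping).foldl (fun d q => d.modify q.1 [] (· ++ [q.2]))
      (PySem.Dict.empty : PySem.Dict String (List String)) with hinv
  have hnodup : invD.keys.Nodup := by
    rw [hinv]
    exact PySem.Dict.nodup_keys_foldl_modify_key _ _ _ _ _ (by simp [PySem.Dict.keys_empty])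
  have hitems : invD.items = invD.keys.map (fun c => (c, invD.getD c [])) :=
    PySem.Dict.items_eq_map_keys invD hnodup []
  have hfresh : (invD.items.foldl
      (fun w q => w.insert q.1 (q.2.foldl (fun m a => m.insert a (1 : Int)) PySem.Dict.empty))
      (PySem.Dict.empty : PySem.Dict String (PySem.Dict String Int))).items
      = ([] : List (String × PySem.Dict String Int)) ++ invD.items.map
          (fun q => (q.1, q.2.foldl (fun m a => m.insert a (1 : Int)) PySem.Dict.empty)) := by
    apply PySem.Dict.items_foldl_insert_fresh
    · intro a _; exact PySem.Dict.contains_empty _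
    · have : invD.items.map Prod.fst = invD.keys := rfl
      rw [this]; exact hnodup
  rw [hfresh, hitems, List.map_map, List.nil_append, List.map_map, ← pv_keys_eq mapping, ← hinv]
  apply List.map_congr_left
  intro c _
  simp only [Function.comp_def]
  congr 1
  rw [← pv_value_eq mapping c]
  congr 1
  rw [hinv, PySem.Dict.getD_foldl_modify_append]
  simp [PySem.Dict.getD_empty]
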